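-- pv_equiv track=rewrite | github.com/Panvitej/Novel-Sorting-algorithm | src/weighted_median.py | hybrid_ads_boolean
-- ===== SOURCE A (Python) =====
-- from typing import List, Dict
-- from typing import List, Tuple
--
-- def hybrid_ads_boolean(arr: List[int], Pmax: int, Pmin: int) -> Dict[str, int]:
--     """
--     Hybrid Adaptive Distinct Set (ADS) Boolean Selection.
--
--     Computes:
--         - Median
--         - p-th maximum
--         - p-th minimum
--
--     using threshold decomposition restricted to distinct values.
--     """
--
--     if not arr:
--         raise ValueError("Input array must not be empty.")
--
--     N = len(arr)
--     arr_sorted = sorted(arr)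
--     distinct_thresholds = sorted(set(arr_sorted))
--
--     results = {
--         "median": 0,
--         "pmax": 0,
--         "pmin": 0
--     }
--
--     prev_threshold = 0
--
--     for t in distinct_thresholds:
--         width = t - prev_threshold
--         prev_threshold = t
--
--         ones = sum(1 for x in arr_sorted if x >= t)
--         zeros = N - ones
--
--         # Median rule
--         if ones > zeros:
--             results["median"] += width
--
--         # p-th maximum rule
--         if ones >= Pmax:
--             results["pmax"] += width
--
--         # p-th minimum rule
--         if zeros < Pmin:
--             results["pmin"] += width
--
--     return results
-- ===== SOURCE B (Python) =====
-- from typing import List, Dict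
--
--
-- def hybrid_ads_boolean(arr: List[int], Pmax: int, Pmin: int) -> Dict[str, int]:
--     """One pass over the sorted array: at the first occurrence of each distinct
--     value t (index i), ones = N - i and zeros = i, so no per-threshold rescan
--     of the array is needed."""
--     if not arr:
--         raise ValueError("Input array must not be empty.")
--     N = len(arr)
--     s = sorted(arr)
--     median = pmax = pmin = 0
--     prev = 0
--     i = 0
--     while i < N:
--         t = s[i]
--         width = t - prev
--         prev = t
--         ones = N - i
--         zeros = i
--         if ones > zeros:
--             median += width
--         if ones >= Pmax:
--             pmax += width
--         if zeros < Pmin: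
--             pmin += width
--         while i < N and s[i] == t:
--             i += 1
--     return {"median": median, "pmax": pmax, "pmin": pmin}
-- ===== Notes on version B (the rewrite author's own statement) =====
-- stated objective: faster
-- what changed: Replaces A's per-threshold rescan of the whole array (recounting x >= t for every distinct t, after building a set) by a single indexed pass over the sorted array in which ones/zeros are read off the first-occurrence index of each distinct value.
import Mathlib
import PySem

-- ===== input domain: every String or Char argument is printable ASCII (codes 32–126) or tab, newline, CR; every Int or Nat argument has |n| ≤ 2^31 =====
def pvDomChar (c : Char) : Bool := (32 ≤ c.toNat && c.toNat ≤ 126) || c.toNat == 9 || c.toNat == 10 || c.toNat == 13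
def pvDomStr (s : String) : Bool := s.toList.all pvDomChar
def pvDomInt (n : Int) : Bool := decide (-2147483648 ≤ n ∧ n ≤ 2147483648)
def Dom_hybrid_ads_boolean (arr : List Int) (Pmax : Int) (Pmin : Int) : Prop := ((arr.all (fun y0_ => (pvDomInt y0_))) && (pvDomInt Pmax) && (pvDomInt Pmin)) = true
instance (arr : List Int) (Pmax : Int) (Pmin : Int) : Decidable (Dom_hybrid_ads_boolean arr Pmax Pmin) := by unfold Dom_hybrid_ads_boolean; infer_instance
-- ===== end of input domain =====

-- B replaces A's per-threshold rescan of the whole array by a single indexed pass over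
-- the sorted array (ones/zeros read off the first-occurrence index of each distinct value).

-- ===== PORT A =====
def hybrid_ads_boolean (arr : List Int) (Pmax : Int) (Pmin : Int) : List (String × Int) :=
  if arr = [] then []  -- Python raises ValueError here (excluded by Pre_)
  else
    let N : Int := arr.length
    let arr_sorted := PySem.List.sorted arr (fun x => x) false
    let distinct_thresholds := PySem.List.sorted (PySem.Set.ofList arr_sorted) (fun x => x) false
    let results : PySem.Dict String Int := PySem.Dict.ofList [("median", 0), ("pmax", 0), ("pmin", 0)]
    let st := distinct_thresholds.foldl (fun (st : PySem.Dict String Int × Int) t =>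
      let width := t - st.2
      let ones : Int := ((arr_sorted.filter (fun x => t ≤ x)).map (fun _ => (1 : Int))).sum
      let zeros := N - ones
      let r1 := if ones > zeros then st.1.modify "median" 0 (· + width) else st.1
      let r2 := if ones ≥ Pmax then r1.modify "pmax" 0 (· + width) else r1
      let r3 := if zeros < Pmin then r2.modify "pmin" 0 (· + width) else r2
      (r3, t)) (results, 0)
    st.1.items

-- ===== PORT B =====
-- the outer while loop of Source B; the inner duplicate-skipping while loop is the dropWhile
def hybridAltLoop (N Pmax Pmin : Int) (s : List Int) (prev median pmax pmin : Int) : Int × Int × Int :=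
  match s with
  | [] => (median, pmax, pmin)
  | t :: rest =>
    let width := t - prev
    let ones : Int := (t :: rest).length
    let zeros := N - ones
    let median' := if ones > zeros then median + width else median
    let pmax' := if ones ≥ Pmax then pmax + width else pmax
    let pmin' := if zeros < Pmin then pmin + width else pmin
    hybridAltLoop N Pmax Pmin (rest.dropWhile (· == t)) t median' pmax' pmin'
termination_by s.length
decreasing_by have := rest.length_dropWhile_le (· == t); simp; omega

def hybrid_ads_boolean_alt (arr : List Int) (Pmax : Int) (Pmin : Int) : List (String × Int) :=
  if arr = [] then []  -- Source B raises ValueError here (excluded by Pre_)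
  else
    let N : Int := arr.length
    let s := PySem.List.sorted arr (fun x => x) false
    let r := hybridAltLoop N Pmax Pmin s 0 0 0 0
    [("median", r.1), ("pmax", r.2.1), ("pmin", r.2.2)]

-- ===== PRECONDITION & SPEC =====
-- Pre_ excludes only the empty list, on which the Python A (and Source B) raise ValueError.
def Pre_hybrid_ads_boolean (arr : List Int) (Pmax : Int) (Pmin : Int) : Prop := arr ≠ []
instance (arr : List Int) (Pmax : Int) (Pmin : Int) : Decidable (Pre_hybrid_ads_boolean arr Pmax Pmin) := by unfold Pre_hybrid_ads_boolean; infer_instance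
def pvWitness_hybrid_ads_boolean : List Int × Int × Int := ([3, 1, 2, 2], 2, 1)
def Spec_hybrid_ads_boolean (arr : List Int) (Pmax : Int) (Pmin : Int) (out : List (String × Int)) : Prop := out = hybrid_ads_boolean_alt arr Pmax Pmin
instance (arr : List Int) (Pmax : Int) (Pmin : Int) (out : List (String × Int)) : Decidable (Spec_hybrid_ads_boolean arr Pmax Pmin out) := by unfold Spec_hybrid_ads_boolean; infer_instance

-- ===== CLAIM (what is proved, stated in full; the proofs are below) =====
def Claim_equal_hybrid_ads_boolean : Prop := ∀ (arr : List Int) (Pmax : Int) (Pmin : Int), Dom_hybrid_ads_boolean arr Pmax Pmin → Pre_hybrid_ads_boolean arr Pmax Pmin → Spec_hybrid_ads_boolean arr Pmax Pmin (hybrid_ads_boolean arr Pmax Pmin)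

-- ===== LEMMAS AND PROOFS =====

-- A's loop body on a (median, pmax, pmin) triple instead of the dict, count function abstracted
def stepT (N Pmax Pmin : Int) (cnt : Int → Int) (st : (Int × Int × Int) × Int) (t : Int) : (Int × Int × Int) × Int :=
  let width := t - st.2
  let ones := cnt t
  let zeros := N - ones
  ((if ones > zeros then st.1.1 + width else st.1.1,
    if ones ≥ Pmax then st.1.2.1 + width else st.1.2.1,
    if zeros < Pmin then st.1.2.2 + width else st.1.2.2), t)

-- the dict state of A's fold is always the 3-entry dict of the parallel triple fold
lemma foldDict (N Pmax Pmin : Int) (cs : List Int) (thr : List Int) : ∀ (prev m a q : Int),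
  thr.foldl (fun (st : PySem.Dict String Int × Int) t =>
      let width := t - st.2
      let ones : Int := ((cs.filter (fun x => t ≤ x)).map (fun _ => (1 : Int))).sum
      let zeros := N - ones
      let r1 := if ones > zeros then st.1.modify "median" 0 (· + width) else st.1
      let r2 := if ones ≥ Pmax then r1.modify "pmax" 0 (· + width) else r1
      let r3 := if zeros < Pmin then r2.modify "pmin" 0 (· + width) else r2
      (r3, t)) (PySem.Dict.ofList [("median", m), ("pmax", a), ("pmin", q)], prev)
  = ((fun T => (PySem.Dict.ofList [("median", T.1.1), ("pmax", T.1.2.1), ("pmin", T.1.2.2)], T.2))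
      (thr.foldl (stepT N Pmax Pmin (fun t => ((cs.filter (fun x => t ≤ x)).map (fun _ => (1 : Int))).sum)) ((m, a, q), prev))) := by
  induction thr with
  | nil => intro prev m a q; rfl
  | cons t thr ih =>
    intro prev m a q
    simp only [List.foldl_cons, stepT]
    split_ifs <;> exact ih t _ _ _

lemma dropWhile_gt (t : Int) (l : List Int) (hp : l.Pairwise (· ≤ ·)) (hge : ∀ x ∈ l, t ≤ x) :
    ∀ x ∈ l.dropWhile (· == t), t < x := by
  induction l with
  | nil => simp
  | cons h tl ih =>
    intro x hx
    rcases List.pairwise_cons.1 hp with ⟨hhd, htl⟩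
    by_cases hbt : (h == t) = true
    · rw [List.dropWhile_cons, if_pos hbt] at hx
      exact ih htl (fun y hy => hge y (.tail _ hy)) x hx
    · rw [List.dropWhile_cons, if_neg hbt] at hx
      have hne : t ≠ h := fun he => hbt (by simp [he])
      have hht : t < h := lt_of_le_of_ne (hge h (.head _)) hne
      rcases List.mem_cons.1 hx with rfl | hx
      · exact hht
      · exact lt_of_lt_of_le hht (hhd x hx)

lemma main_lemma (N Pmax Pmin : Int) (s : List Int) (hs : s.Pairwise (· ≤ ·)) : ∀ (prev m a q : Int),
    ((PySem.List.sorted (PySem.Set.ofList s) (fun x => x) false).foldl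
        (stepT N Pmax Pmin (fun t => (s.countP (fun x => t ≤ x) : Int))) ((m, a, q), prev)).1
    = hybridAltLoop N Pmax Pmin s prev m a q := by
  induction hn : s.length using Nat.strong_induction_on generalizing s with
  | _ n ih => ?_
  cases s with
  | nil =>
    intro prev m a q
    rw [hybridAltLoop, show PySem.List.sorted (PySem.Set.ofList ([] : List Int)) (fun x => x) false = [] from rfl]
    rfl
  | cons t rest =>
    intro prev m a q
    obtain ⟨hge, hrp⟩ := List.pairwise_cons.1 hs
    have hgt : ∀ x ∈ rest.dropWhile (· == t), t < x := dropWhile_gt t rest hrp hge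
    have hsub : (rest.dropWhile (· == t)).Sublist rest := List.dropWhile_sublist _
    have hrp' : (rest.dropWhile (· == t)).Pairwise (· ≤ ·) := hrp.sublist hsub
    -- membership of the sorted distinct tail
    have hmemsrt : ∀ x, x ∈ PySem.List.sorted (PySem.Set.ofList (rest.dropWhile (· == t))) (fun x => x) false ↔ x ∈ rest.dropWhile (· == t) := by
      intro x
      rw [PySem.List.mem_sorted, PySem.Set.mem_ofList]
    -- Fact 1: sorted(set(t::rest)) = t :: sorted(set(rest'))
    have h1 : PySem.List.sorted (PySem.Set.ofList (t :: rest)) (fun x => x) false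
        = t :: PySem.List.sorted (PySem.Set.ofList (rest.dropWhile (· == t))) (fun x => x) false := by
      apply PySem.List.sorted_eq_of_perm_of_pairwise_lt
      · -- Perm
        apply (List.perm_ext_iff_of_nodup ?_ ?_).2
        · intro x
          rw [List.mem_cons, hmemsrt, PySem.Set.mem_ofList, List.mem_cons]
          constructor
          · rintro (rfl | hx)
            · exact Or.inl rfl
            · exact Or.inr (hsub.subset hx)
          · rintro (rfl | hx)
            · exact Or.inl rfl
            · rw [← rest.takeWhile_append_dropWhile (p := (· == t))] at hx
              rcases List.mem_append.1 hx with hx | hx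
              · exact Or.inl (by simpa using List.mem_takeWhile_imp hx)
              · exact Or.inr hx
        · refine List.nodup_cons.2 ⟨fun hx => ?_, ?_⟩
          · exact lt_irrefl t (hgt t ((hmemsrt t).1 hx))
          · exact (PySem.List.sorted_perm _ _ _).nodup_iff.2 (PySem.Set.nodup_ofList _)
        · exact PySem.Set.nodup_ofList _
      · refine List.pairwise_cons.2 ⟨fun u hu => hgt u ((hmemsrt u).1 hu), ?_⟩
        exact PySem.List.sorted_ofList_pairwise_lt _
    -- count at threshold t over the whole list is its length
    have hcnt : ((t :: rest).countP (fun x => decide (t ≤ x)) : Int) = ((t :: rest).length : Int) := by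
      have := List.countP_eq_length (p := fun x => decide (t ≤ x)) (l := t :: rest)
      rw [this.2]
      intro x hx
      rcases List.mem_cons.1 hx with rfl | hx
      · simp
      · simpa using hge x hx
    rw [h1, List.foldl_cons]
    have hstep : stepT N Pmax Pmin (fun u => ((t :: rest).countP (fun x => u ≤ x) : Int)) ((m, a, q), prev) t
        = ((if ((t :: rest).length : Int) > N - ((t :: rest).length : Int) then m + (t - prev) else m,
            if ((t :: rest).length : Int) ≥ Pmax then a + (t - prev) else a,
            if N - ((t :: rest).length : Int) < Pmin then q + (t - prev) else q), t) := by
      simp only [stepT]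
      rw [hcnt]
    rw [hstep]
    -- switch the count list from (t :: rest) to rest'
    have hswap : ∀ (acc : (Int × Int × Int) × Int) (u : Int),
        u ∈ PySem.List.sorted (PySem.Set.ofList (rest.dropWhile (· == t))) (fun x => x) false →
        stepT N Pmax Pmin (fun v => ((t :: rest).countP (fun x => v ≤ x) : Int)) acc u
          = stepT N Pmax Pmin (fun v => ((rest.dropWhile (· == t)).countP (fun x => v ≤ x) : Int)) acc u := by
      intro acc u hu
      have htu : t < u := hgt u ((hmemsrt u).1 hu)
      have : (t :: rest).countP (fun x => decide (u ≤ x)) = (rest.dropWhile (· == t)).countP (fun x => decide (u ≤ x)) := by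
        rw [← rest.takeWhile_append_dropWhile (p := (· == t))]
        rw [List.countP_cons, List.countP_append]
        have h0 : (rest.takeWhile (· == t)).countP (fun x => decide (u ≤ x)) = 0 := by
          rw [List.countP_eq_zero]
          intro x hx
          have : x = t := by simpa using List.mem_takeWhile_imp hx
          simp [this]
          omega
        rw [h0]
        simp
        omega
      simp only [stepT, this]
    rw [PySem.List.foldl_congr_mem _ _ _ _ hswap]
    rw [ih (rest.dropWhile (· == t)).length
          (by have := rest.length_dropWhile_le (· == t); simp at hn; omega)
          (rest.dropWhile (· == t)) hrp' rfl t _ _ _]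
    rw [hybridAltLoop]

-- ===== VERDICT (by name: the statement is the Claim_ definition above) =====
theorem hybrid_ads_boolean_spec : Claim_equal_hybrid_ads_boolean := by
  intro arr Pmax Pmin _ hpre
  unfold Spec_hybrid_ads_boolean
  unfold Pre_hybrid_ads_boolean at hpre
  simp only [hybrid_ads_boolean, hybrid_ads_boolean_alt, if_neg hpre]
  rw [foldDict]
  have hsum : (fun t => (((PySem.List.sorted arr (fun x => x) false).filter (fun x => t ≤ x)).map (fun _ => (1 : Int))).sum)
      = (fun t => ((PySem.List.sorted arr (fun x => x) false).countP (fun x => t ≤ x) : Int)) := by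
    funext t
    simp [List.countP_eq_length_filter]
  rw [hsum]
  rw [show ∀ (T : (Int × Int × Int) × Int),
        ((fun T => (PySem.Dict.ofList [("median", T.1.1), ("pmax", T.1.2.1), ("pmin", T.1.2.2)], T.2)) T).1.items
          = [("median", T.1.1), ("pmax", T.1.2.1), ("pmin", T.1.2.2)] from fun T => rfl]
  rw [main_lemma (arr.length : Int) Pmax Pmin (PySem.List.sorted arr (fun x => x) false)
        (by simpa using PySem.List.sorted_pairwise arr (fun x => x)) 0 0 0 0]
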